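-- pv_equiv track=rewrite | github.com/TejaswiA05V0/GeeksForGeeks | Palindrome Binary.py | isBinaryPalindrome
-- ===== SOURCE A (Python) =====
-- def isBinaryPalindrome(n):
--     # code here
--     res = ''
--     while n > 0:
--         res = str(n & 1) + res
--         n >>= 1
--     binary = res
--     if binary == binary[::-1]:
--         return True
--     return False
-- ===== SOURCE B (Python) =====
-- def isBinaryPalindrome(n):
--     k = n.bit_length()
--     i, j = 0, k - 1
--     while i < j:
--         if (n >> i) & 1 != (n >> j) & 1:
--             return False
--         i += 1
--         j -= 1
--     return True
-- ===== Notes on version B (the rewrite author's own statement) =====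
-- stated objective: alternative
-- what changed: B never builds the binary string: it takes k = n.bit_length() and compares the i-th and j-th bits of n with two pointers moving inward, returning False at the first mismatch, instead of A's digit-by-digit string construction, reversal and whole-string comparison.
-- outside the precondition, e.g. on isBinaryPalindrome(-3): A returns True, B returns False
import Mathlib
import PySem

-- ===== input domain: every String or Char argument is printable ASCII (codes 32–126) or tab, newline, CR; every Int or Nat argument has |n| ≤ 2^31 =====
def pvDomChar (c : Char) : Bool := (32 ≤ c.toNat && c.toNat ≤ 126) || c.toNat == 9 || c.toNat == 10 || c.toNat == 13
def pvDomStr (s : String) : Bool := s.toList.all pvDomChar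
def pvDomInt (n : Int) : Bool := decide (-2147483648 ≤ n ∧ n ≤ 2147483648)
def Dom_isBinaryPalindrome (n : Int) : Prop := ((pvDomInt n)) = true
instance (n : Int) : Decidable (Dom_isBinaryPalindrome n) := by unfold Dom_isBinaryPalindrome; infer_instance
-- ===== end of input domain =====

-- B compares bits in place with two pointers (early exit) instead of building the binary
-- string digit by digit, reversing it and comparing the whole strings.

-- ===== PORT A =====
-- while n > 0: res = str(n & 1) + res; n >>= 1
def pvALoop (n : Int) (res : String) : String :=
  if 0 < n then pvALoop (n >>> (1 : Nat)) (PySem.Int.toStr (PySem.Int.band n 1) ++ res) else res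
termination_by n.toNat
decreasing_by rw [Int.shiftRight_eq_div_pow]; norm_num; omega

def isBinaryPalindrome (n : Int) : Bool :=
  let binary := pvALoop n ""
  match PySem.Str.slice? binary none none (-1) with   -- binary[::-1]; step -1 never raises
  | some rev => if binary == rev then true else false
  | none => false

-- ===== PORT B =====
-- while i < j: mismatch of (n >> i) & 1 and (n >> j) & 1 returns False
-- (while the loop runs, 0 ≤ i < j, so .toNat on the shift amounts is exact)
def pvBLoop (n i j : Int) : Bool :=
  if i < j then
    if PySem.Int.band (n >>> i.toNat) 1 ≠ PySem.Int.band (n >>> j.toNat) 1 then false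
    else pvBLoop n (i + 1) (j - 1)
  else true
termination_by (j - i).toNat
decreasing_by omega

def isBinaryPalindrome_alt (n : Int) : Bool :=
  let k : Int := PySem.Int.bitLength n
  pvBLoop n 0 (k - 1)

-- ===== PRECONDITION & SPEC =====
-- Pre_ excludes negative n, a corner outside the function's natural domain (an integer's "binary
-- representation"): A's empty-loop True and B's two's-complement bit reading are both accidental there.
def Pre_isBinaryPalindrome (n : Int) : Prop := 0 ≤ n
instance (n : Int) : Decidable (Pre_isBinaryPalindrome n) := by unfold Pre_isBinaryPalindrome; infer_instance
def pvWitness_isBinaryPalindrome : Int := 9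

def Spec_isBinaryPalindrome (n : Int) (out : Bool) : Prop := out = isBinaryPalindrome_alt n
instance (n : Int) (out : Bool) : Decidable (Spec_isBinaryPalindrome n out) := by unfold Spec_isBinaryPalindrome; infer_instance

-- ===== CLAIM (what is proved, stated in full; the proofs are below) =====
def Claim_equal_isBinaryPalindrome : Prop := ∀ (n : Int), Dom_isBinaryPalindrome n → Pre_isBinaryPalindrome n → Spec_isBinaryPalindrome n (isBinaryPalindrome n)

-- ===== LEMMAS AND PROOFS =====

-- bit t of m, as Python's (m >> t) & 1 computes it for m ≥ 0
def pvBit (m t : Nat) : Nat := m / 2 ^ t % 2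

-- the character str(b) for a bit value b
def pvBChar (x : Nat) : Char := if x = 1 then '1' else '0'

-- the string A's loop builds, as a list of characters (MSB first)
def pvBinChars (m : Nat) : List Char :=
  if m = 0 then [] else pvBinChars (m / 2) ++ [pvBChar (m % 2)]
termination_by m
decreasing_by omega

-- bit length of m, through B's port
def pvBL (m : Nat) : Nat := PySem.Int.bitLength (m : Int)

-- the common palindrome property both programs decide
def pvPal (m : Nat) : Prop := ∀ i < pvBL m, pvBit m i = pvBit m (pvBL m - 1 - i)

lemma pvBit_lt_two (m t : Nat) : pvBit m t < 2 := Nat.mod_lt _ (by omega)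

lemma pvBChar_inj {x y : Nat} (hx : x < 2) (hy : y < 2) (h : pvBChar x = pvBChar y) : x = y := by
  interval_cases x <;> interval_cases y <;> simp_all [pvBChar]

lemma pvBit_zero (m : Nat) : pvBit m 0 = m % 2 := by simp [pvBit]

lemma pvBit_half (m t : Nat) : pvBit (m / 2) t = pvBit m (t + 1) := by
  simp [pvBit, Nat.div_div_eq_div_mul, pow_succ, mul_comm]

lemma pvBL_zero : pvBL 0 = 0 := by decide

lemma pvBL_pos (m : Nat) (h : 0 < m) : pvBL m = pvBL (m / 2) + 1 :=
  PySem.Int.bitLength_natCast h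

lemma pvBinChars_length (m : Nat) : (pvBinChars m).length = pvBL m := by
  induction m using Nat.strong_induction_on with
  | _ m ih =>
    rw [pvBinChars]
    by_cases h : m = 0
    · simp [h, pvBL_zero]
    · simp [h, ih (m / 2) (by omega), pvBL_pos m (by omega)]

lemma pvBinChars_getElem (m : Nat) : ∀ (i : Nat) (h : i < pvBL m),
    (pvBinChars m)[i]'(by rw [pvBinChars_length]; exact h) = pvBChar (pvBit m (pvBL m - 1 - i)) := by
  induction m using Nat.strong_induction_on with
  | _ m ih =>
    intro i h
    by_cases hm : m = 0
    · subst hm; rw [pvBL_zero] at h; omega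
    · have hrec : pvBinChars m = pvBinChars (m / 2) ++ [pvBChar (m % 2)] := by
        rw [pvBinChars]; simp [hm]
      have hL : pvBL m = pvBL (m / 2) + 1 := pvBL_pos m (by omega)
      have hlen : (pvBinChars (m / 2)).length = pvBL (m / 2) := pvBinChars_length _
      by_cases hi : i < pvBL (m / 2)
      · have : (pvBinChars m)[i]'(by rw [pvBinChars_length]; exact h)
            = (pvBinChars (m / 2))[i]'(by rw [hlen]; exact hi) := by
          simp only [hrec]
          exact List.getElem_append_left (by rw [hlen]; exact hi)
        rw [this, ih (m / 2) (by omega) i hi, pvBit_half]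
        congr 2
        omega
      · have hieq : i = pvBL (m / 2) := by omega
        have : (pvBinChars m)[i]'(by rw [pvBinChars_length]; exact h) = pvBChar (m % 2) := by
          simp only [hrec]
          rw [List.getElem_append_right (by omega)]
          simp [hlen, hieq]
        rw [this, ← pvBit_zero]
        congr 2
        omega

lemma pvPal_iff_list (m : Nat) :
    pvBinChars m = (pvBinChars m).reverse ↔ pvPal m := by
  constructor
  · intro hrev i hi
    have h1 : (pvBinChars m)[i]'(by rw [pvBinChars_length]; exact hi)
        = (pvBinChars m).reverse[i]'(by rw [List.length_reverse, pvBinChars_length]; exact hi) := by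
      congr 1
    rw [List.getElem_reverse] at h1
    rw [pvBinChars_getElem m i hi] at h1
    have hlen : (pvBinChars m).length = pvBL m := pvBinChars_length m
    have h2 : (pvBinChars m).length - 1 - i < pvBL m := by omega
    rw [pvBinChars_getElem m _ (by omega : (pvBinChars m).length - 1 - i < pvBL m)] at h1
    have e1 : pvBL m - 1 - ((pvBinChars m).length - 1 - i) = i := by omega
    rw [e1] at h1
    exact (pvBChar_inj (pvBit_lt_two _ _) (pvBit_lt_two _ _) h1).symm
  · intro hpal
    apply List.ext_getElem (by simp)
    intro i h1 h2
    rw [List.getElem_reverse]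
    have hlen : (pvBinChars m).length = pvBL m := pvBinChars_length m
    have hi : i < pvBL m := by omega
    rw [pvBinChars_getElem m i hi,
        pvBinChars_getElem m _ (by omega : (pvBinChars m).length - 1 - i < pvBL m)]
    have e1 : pvBL m - 1 - ((pvBinChars m).length - 1 - i) = i := by omega
    rw [e1]
    exact congrArg pvBChar (hpal i hi).symm

lemma pvALoop_toList (m : Nat) : ∀ s : String, (pvALoop (m : Int) s).toList = pvBinChars m ++ s.toList := by
  induction m using Nat.strong_induction_on with
  | _ m ih =>
    intro s
    rw [pvALoop, pvBinChars]
    by_cases hm : m = 0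
    · simp [hm]
    · have hpos : (0 : Int) < (m : Int) := by exact_mod_cast Nat.pos_of_ne_zero hm
      rw [if_pos hpos, if_neg hm]
      have hshift : ((m : Int) >>> (1 : Nat)) = ((m / 2 : Nat) : Int) := by
        rw [Int.shiftRight_eq_div_pow]
        norm_num
      have hband : PySem.Int.band (m : Int) 1 = ((m % 2 : Nat) : Int) := by
        rw [PySem.Int.band_one]
        exact_mod_cast PySem.Int.mod_natCast m 2
      have hts : (PySem.Int.toStr (PySem.Int.band (m : Int) 1) ++ s).toList
          = pvBChar (m % 2) :: s.toList := by
        have h1 : (PySem.Int.toStr (PySem.Int.band (m : Int) 1)).toList = [pvBChar (m % 2)] := by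
          rw [PySem.Int.toList_toStr, hband]
          rcases Nat.mod_two_eq_zero_or_one m with h | h <;> rw [h] <;> decide
        simp [h1]
      rw [hshift, ih (m / 2) (by omega), hts]
      simp

lemma pvA_iff (m : Nat) : isBinaryPalindrome (m : Int) = true ↔ pvPal m := by
  rw [isBinaryPalindrome]
  simp only [PySem.Str.slice?_none_none_neg_one]
  have hlist : (pvALoop (m : Int) "").toList = pvBinChars m := by
    simpa using pvALoop_toList m "" 
  constructor
  · intro h
    rw [← pvPal_iff_list, ← hlist]
    split_ifs at h with heq
    have := beq_iff_eq.mp (by exact heq)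
    have h2 := congrArg String.toList this
    simpa using h2
  · intro hpal
    rw [← pvPal_iff_list, ← hlist] at hpal
    have : pvALoop (m : Int) "" = String.ofList (pvALoop (m : Int) "").toList.reverse := by
      apply String.toList_inj.mp
      simpa using hpal
    simp [← this]

lemma pvBand_shift (m a : Nat) : PySem.Int.band ((m : Int) >>> a) 1 = ((pvBit m a : Nat) : Int) := by
  have h1 : ((m : Int) >>> a) = ((m >>> a : Nat) : Int) := by simp
  rw [h1, PySem.Int.band_one]
  have h2 : PySem.Int.mod ((m >>> a : Nat) : Int) 2 = (((m >>> a) % 2 : Nat) : Int) := by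
    exact_mod_cast PySem.Int.mod_natCast (m >>> a) 2
  rw [h2]
  congr 1
  simp [pvBit, Nat.shiftRight_eq_div_pow]

lemma pvBLoop_iff (m : Nat) : ∀ (k : Nat) (i j : Int), (j - i).toNat = k → 0 ≤ i →
    (pvBLoop (m : Int) i j = true ↔
      ∀ t : Int, i ≤ t → t < i + j - t → pvBit m t.toNat = pvBit m (i + j - t).toNat) := by
  intro k
  induction k using Nat.strong_induction_on with
  | _ k ih =>
    intro i j hk hi
    rw [pvBLoop]
    by_cases hij : i < j
    · rw [if_pos hij]
      rw [pvBand_shift, pvBand_shift]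
      by_cases hbit : pvBit m i.toNat = pvBit m j.toNat
      · rw [if_neg (by simp [hbit])]
        rw [ih ((j - 1 - (i + 1)).toNat) (by omega) (i + 1) (j - 1) rfl (by omega)]
        constructor
        · intro h t ht1 ht2
          by_cases hti : t = i
          · rw [hti]
            have e : i + j - i = j := by ring
            rw [e]; exact hbit
          · have := h t (by omega) (by omega)
            have e : i + 1 + (j - 1) = i + j := by ring
            rw [e] at this
            exact this
        · intro h t ht1 ht2
          have e : i + 1 + (j - 1) = i + j := by ring
          rw [e]
          exact h t (by omega) (by omega)
      · rw [if_pos (by simp [hbit])]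
        refine iff_of_false (by simp) ?_
        intro h
        apply hbit
        have := h i le_rfl (by omega)
        have e : i + j - i = j := by ring
        rw [e] at this
        exact this
    · rw [if_neg hij]
      refine iff_of_true rfl ?_
      intro t ht1 ht2
      omega
lemma pvB_iff (m : Nat) : isBinaryPalindrome_alt (m : Int) = true ↔ pvPal m := by
  rw [isBinaryPalindrome_alt]
  have hbl : PySem.Int.bitLength ((m : Nat) : Int) = pvBL m := rfl
  rw [hbl]
  rw [pvBLoop_iff m ((pvBL m : Int) - 1 - 0).toNat 0 ((pvBL m : Int) - 1) rfl le_rfl]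
  constructor
  · intro h i hi
    by_cases hcase : (2 : Int) * i < (pvBL m : Int) - 1
    · have := h (i : Int) (by omega) (by omega)
      have e : ((0 : Int) + ((pvBL m : Int) - 1) - (i : Int)).toNat = pvBL m - 1 - i := by omega
      rw [e] at this
      simpa using this
    · by_cases heq : 2 * i = pvBL m - 1
      · have : pvBL m - 1 - i = i := by omega
        rw [this]
      · have hlt : 2 * (pvBL m - 1 - i) < pvBL m - 1 := by omega
        have := h ((pvBL m - 1 - i : Nat) : Int) (by omega) (by omega)
        have e1 : (((pvBL m - 1 - i : Nat) : Int)).toNat = pvBL m - 1 - i := by omega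
        have e2 : ((0 : Int) + ((pvBL m : Int) - 1) - ((pvBL m - 1 - i : Nat) : Int)).toNat = i := by omega
        rw [e1, e2] at this
        exact this.symm
  · intro h t ht1 ht2
    have hbl1 : 1 ≤ pvBL m := by omega
    have hlt : t.toNat < pvBL m := by omega
    have := h t.toNat hlt
    have e : ((0 : Int) + ((pvBL m : Int) - 1) - t).toNat = pvBL m - 1 - t.toNat := by omega
    rw [e]
    exact this

-- ===== VERDICT (by name: the statement is the Claim_ definition above) =====
theorem isBinaryPalindrome_spec : Claim_equal_isBinaryPalindrome := by
  intro n _ hpre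
  unfold Spec_isBinaryPalindrome
  have h0 : (0 : Int) ≤ n := hpre
  obtain ⟨m, rfl⟩ : ∃ m : Nat, n = (m : Int) := ⟨n.toNat, by omega⟩
  have hA := pvA_iff m
  have hB := pvB_iff m
  by_cases hp : pvPal m
  · rw [hA.mpr hp, hB.mpr hp]
  · rcases Bool.eq_false_or_eq_true (isBinaryPalindrome (m : Int)) with h1 | h1 <;>
    rcases Bool.eq_false_or_eq_true (isBinaryPalindrome_alt (m : Int)) with h2 | h2 <;>
    simp_all
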